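-- pv_equiv track=rewrite | github.com/IanCarmona/Practicas-Algoritmos-Bioinspirados | Genetico-Cuadrado-Magico/P5.py | calculaAptitudMax
-- ===== SOURCE A (Python) =====
-- def redimensionar_lista_a_matriz(lista, n):
--     if len(lista) != n*n:
--         return "El número de elementos en la lista no coincide con una matriz de nxn."
--
--     matriz = [lista[i:i+n] for i in range(0, len(lista), n)]
--     return matriz
--
-- def calcular_suma_magica(n):
--     return n * (n**2 + 1) // 2
--
-- def calculaAptitudMax(X, n):
--     arr_2d = redimensionar_lista_a_matriz(X, n)
--
--     contador = 0
--
--     for i in range(n):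
--         suma = 0
--         for j in range(n):
--             suma += arr_2d[i][j]
--
--         if (suma == calcular_suma_magica(n)):
--             contador = contador + 1
--
--     for i in range(n):
--         suma = 0
--         for j in range(n):
--             suma += arr_2d[j][i]
--
--         if (suma == calcular_suma_magica(n)):
--             contador = contador + 1
--
--     suma = 0
--     for i in range(n):
--         suma += arr_2d[i][i]
--
--     if (suma == calcular_suma_magica(n)):
--             contador = contador + 1
--
--     suma = 0
--     for i in range(n):
--         suma += arr_2d[i][n - 1 - i]
--
--     if (suma == calcular_suma_magica(n)):
--             contador = contador + 1
--
--     return contador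
-- ===== SOURCE B (Python) =====
-- def calculaAptitudMax(X, n):
--     # one pass over the n*n cells, accumulating all row/column/diagonal sums at once
--     magic = n * (n**2 + 1) // 2
--     row = [0] * n
--     col = [0] * n
--     diag = 0
--     anti = 0
--     for i in range(n):
--         base = i * n
--         for j in range(n):
--             v = X[base + j]
--             row[i] += v
--             col[j] += v
--             if i == j:
--                 diag += v
--             if i + j == n - 1:
--                 anti += v
--     count = 0
--     for s in row:
--         if s == magic:
--             count += 1
--     for s in col:
--         if s == magic:
--             count += 1
--     if diag == magic:
--         count += 1
--     if anti == magic: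
--         count += 1
--     return count
-- ===== Notes on version B (the rewrite author's own statement) =====
-- stated objective: alternative
-- what changed: Instead of reshaping the list into a matrix and making four separate passes (rows, columns, each diagonal), B makes a single pass over the n*n flat cells, accumulating all row sums, column sums and both diagonal sums simultaneously, then counts the matches once.
import Mathlib
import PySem

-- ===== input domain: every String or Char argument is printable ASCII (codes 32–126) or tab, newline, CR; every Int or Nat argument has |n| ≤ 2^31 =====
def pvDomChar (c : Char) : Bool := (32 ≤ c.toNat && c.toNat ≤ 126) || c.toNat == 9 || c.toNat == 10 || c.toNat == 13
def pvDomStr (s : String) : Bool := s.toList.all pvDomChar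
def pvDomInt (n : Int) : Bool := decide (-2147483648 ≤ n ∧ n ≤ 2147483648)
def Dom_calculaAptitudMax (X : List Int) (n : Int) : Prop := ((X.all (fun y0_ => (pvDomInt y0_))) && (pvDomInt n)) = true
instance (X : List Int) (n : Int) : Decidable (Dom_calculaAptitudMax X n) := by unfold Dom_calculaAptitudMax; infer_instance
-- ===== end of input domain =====

-- B replaces A's matrix reshape plus four separate sweeps (rows, columns, two diagonals) by a
-- single pass over the n*n flat cells accumulating every sum at once; equal cost, different shape.

-- ===== PORT A =====
def pvRedim (lista : List Int) (n : Int) : Option (List (List Int)) :=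
  if (lista.length : Int) ≠ n * n then none
  else some ((PySem.List.pyRange 0 (lista.length : Int) n).map
      (fun i => PySem.List.slice lista (some i) (some (i + n))))

def pvSumaMagica (n : Int) : Int := PySem.Int.floordiv (n * (n ^ 2 + 1)) 2

def pvElem (arr2d : Option (List (List Int))) (i j : Int) : Int :=
  match arr2d with
  | none => 0
  | some m => PySem.List.pyGetD (PySem.List.pyGetD m i []) j 0

def calculaAptitudMax (X : List Int) (n : Int) : Int :=
  let arr2d := pvRedim X n
  let contador : Int := 0
  let contador := (PySem.List.pyRange 0 n 1).foldl (fun c i =>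
      let suma := (PySem.List.pyRange 0 n 1).foldl (fun s j => s + pvElem arr2d i j) 0
      if suma = pvSumaMagica n then c + 1 else c) contador
  let contador := (PySem.List.pyRange 0 n 1).foldl (fun c i =>
      let suma := (PySem.List.pyRange 0 n 1).foldl (fun s j => s + pvElem arr2d j i) 0
      if suma = pvSumaMagica n then c + 1 else c) contador
  let suma := (PySem.List.pyRange 0 n 1).foldl (fun s i => s + pvElem arr2d i i) 0
  let contador := if suma = pvSumaMagica n then contador + 1 else contador
  let suma := (PySem.List.pyRange 0 n 1).foldl (fun s i => s + pvElem arr2d i (n - 1 - i)) 0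
  let contador := if suma = pvSumaMagica n then contador + 1 else contador
  contador

def pvAltBody (X : List Int) (n i : Int) (st : List Int × List Int × Int × Int) (j : Int) :
    List Int × List Int × Int × Int :=
  let v := PySem.List.pyGetD X (i * n + j) 0
  let row := PySem.List.pySetD st.1 i (PySem.List.pyGetD st.1 i 0 + v)
  let col := PySem.List.pySetD st.2.1 j (PySem.List.pyGetD st.2.1 j 0 + v)
  let diag := if i = j then st.2.2.1 + v else st.2.2.1
  let anti := if i + j = n - 1 then st.2.2.2 + v else st.2.2.2
  (row, col, diag, anti)

def calculaAptitudMax_alt (X : List Int) (n : Int) : Int :=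
  let magic := PySem.Int.floordiv (n * (n ^ 2 + 1)) 2
  let row : List Int := List.replicate n.toNat 0
  let col : List Int := List.replicate n.toNat 0
  let st := (PySem.List.pyRange 0 n 1).foldl (fun st i =>
      (PySem.List.pyRange 0 n 1).foldl (pvAltBody X n i) st) (row, col, 0, 0)
  let count : Int := 0
  let count := st.1.foldl (fun c s => if s = magic then c + 1 else c) count
  let count := st.2.1.foldl (fun c s => if s = magic then c + 1 else c) count
  let count := if st.2.2.1 = magic then count + 1 else count
  let count := if st.2.2.2 = magic then count + 1 else count
  count


-- ===== PRECONDITION & SPEC =====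
-- Pre_ excludes exactly the inputs where A raises: n >= 1 with len(X) != n*n (TypeError from
-- indexing the helper's error string) and n = 0 with X = [] (ValueError from range(0, 0, 0)).
def Pre_calculaAptitudMax (X : List Int) (n : Int) : Prop :=
  (0 < n → (X.length : Int) = n * n) ∧ (n = 0 → X ≠ [])
instance (X : List Int) (n : Int) : Decidable (Pre_calculaAptitudMax X n) := by
  unfold Pre_calculaAptitudMax; infer_instance

def pvWitness_calculaAptitudMax : List Int × Int := ([2, 7, 6, 9, 5, 1, 4, 3, 8], 3)

def Spec_calculaAptitudMax (X : List Int) (n : Int) (out : Int) : Prop := out = calculaAptitudMax_alt X n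
instance (X : List Int) (n : Int) (out : Int) : Decidable (Spec_calculaAptitudMax X n out) := by
  unfold Spec_calculaAptitudMax; infer_instance

-- ===== CLAIM (what is proved, stated in full; the proofs are below) =====
def Claim_equal_calculaAptitudMax : Prop := ∀ (X : List Int) (n : Int), Dom_calculaAptitudMax X n → Pre_calculaAptitudMax X n → Spec_calculaAptitudMax X n (calculaAptitudMax X n)

-- ===== LEMMAS AND PROOFS =====

def pvS (X : List Int) (N i j : Nat) : Int := X.getD (i * N + j) 0
def pvRowSum (X : List Int) (N i : Nat) : Int := ((List.range N).map (fun j => pvS X N i j)).sum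
def pvColSum (X : List Int) (N j : Nat) : Int := ((List.range N).map (fun i => pvS X N i j)).sum

def pvMagicCnt (X : List Int) (N : Nat) : Int :=
  let magic := pvSumaMagica (N : Int)
  let c0 : Int := (0 : Int) + (((List.range N).countP (fun i => decide (pvRowSum X N i = magic))) : Int)
  let c1 := c0 + (((List.range N).countP (fun j => decide (pvColSum X N j = magic))) : Int)
  let c2 := if (0 : Int) + ((List.range N).map (fun i => pvS X N i i)).sum = magic then c1 + 1 else c1
  if (0 : Int) + ((List.range N).map (fun i => pvS X N i (N - 1 - i))).sum = magic then c2 + 1 else c2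

lemma pvRedim_eq (X : List Int) (N : Nat) (hN : 0 < N) (hlen : X.length = N * N) :
    pvRedim X (N : Int) = some ((List.range N).map (fun k => List.take N (List.drop (k * N) X))) := by
  unfold pvRedim
  rw [if_neg (by push_cast [hlen]; ring_nf; exact fun h => h rfl)]
  congr 1
  rw [PySem.List.pyRange_of_pos 0 _ (by exact_mod_cast hN), if_pos (by push_cast [hlen]; positivity)]
  have hdiv : ((((N : Int) * N) - 0 + N - 1) / N).toNat = N := by
    have h1 : ((N : Int) * N) - 0 + N - 1 = (N - 1) + N * N := by ring
    rw [h1, Int.add_mul_ediv_left _ _ (by exact_mod_cast hN.ne' : (N : Int) ≠ 0),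
      Int.ediv_eq_zero_of_lt (by omega) (by omega)]
    omega
  rw [hlen]; push_cast
  rw [hdiv, List.map_map]
  apply List.map_congr_left
  intro k hk
  simp only [Function.comp]
  have h2 : (0 : Int) + (N : Int) * k = ((k * N : Nat) : Int) := by push_cast; ring
  rw [h2, PySem.List.slice_natCast_add]

lemma pvElem_eq (X : List Int) (N : Nat) (hN : 0 < N) (hlen : X.length = N * N)
    (i j : Int) (hi0 : 0 ≤ i) (hiN : i < (N : Int)) (hj0 : 0 ≤ j) (hjN : j < (N : Int)) :
    pvElem (pvRedim X (N : Int)) i j = pvS X N i.toNat j.toNat := by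
  rw [pvRedim_eq X N hN hlen]
  have hi : i = ((i.toNat : Nat) : Int) := by omega
  have hj : j = ((j.toNat : Nat) : Int) := by omega
  rw [pvElem, hi, hj, PySem.List.pyGetD_natCast, PySem.List.pyGetD_natCast,
    PySem.List.getD_map_range _ _ _ _ (by omega)]
  rw [pvS, List.getD_eq_getElem?_getD, List.getD_eq_getElem?_getD,
    List.getElem?_take, if_pos (by omega), List.getElem?_drop]
  congr 3

lemma pvA_eq (X : List Int) (N : Nat) (hN : 0 < N) (hlen : X.length = N * N) :
    calculaAptitudMax X (N : Int) = pvMagicCnt X N := by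
  have hrng : PySem.List.pyRange 0 (N : Int) 1 = (List.range N).map (fun k => ((k : Nat) : Int)) := by
    rw [PySem.List.pyRange_one]
    simp
  have hElem : ∀ (x y : Nat), x < N → y < N →
      pvElem (pvRedim X (N : Int)) (x : Int) (y : Int) = pvS X N x y := by
    intro x y hx hy
    have h := pvElem_eq X N hN hlen (x : Int) (y : Int) (by omega) (by omega) (by omega) (by omega)
    simpa using h
  have hElemAnti : ∀ (y : Nat), y < N →
      pvElem (pvRedim X (N : Int)) (y : Int) ((N : Int) - 1 - (y : Int)) = pvS X N y (N - 1 - y) := by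
    intro y hy
    have h := pvElem_eq X N hN hlen (y : Int) ((N : Int) - 1 - (y : Int))
      (by omega) (by omega) (by omega) (by omega)
    simpa [show (((N : Int) - 1 - (y : Int))).toNat = N - 1 - y by omega] using h
  unfold calculaAptitudMax pvMagicCnt
  simp only [PySem.List.foldl_ite_add_one, hrng, List.foldl_map, PySem.List.foldl_add]
  simp only [zero_add]
  have hR : ∀ x : Nat, x < N →
      ((List.range N).map (fun (y : Nat) => pvElem (pvRedim X (N : Int)) (x : Int) (y : Int))).sum
        = pvRowSum X N x := by
    intro x hx
    unfold pvRowSum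
    exact congrArg List.sum (List.map_congr_left (fun y hy => hElem x y hx (List.mem_range.mp hy)))
  have hC : ∀ x : Nat, x < N →
      ((List.range N).map (fun (y : Nat) => pvElem (pvRedim X (N : Int)) (y : Int) (x : Int))).sum
        = pvColSum X N x := by
    intro x hx
    unfold pvColSum
    exact congrArg List.sum (List.map_congr_left (fun y hy => hElem y x (List.mem_range.mp hy) hx))
  have hcntR : List.countP
      (fun (x : Nat) => decide (((List.range N).map (fun (y : Nat) => pvElem (pvRedim X (N : Int)) (x : Int) (y : Int))).sum = pvSumaMagica (N : Int)))
      (List.range N)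
      = List.countP (fun i => decide (pvRowSum X N i = pvSumaMagica (N : Int))) (List.range N) :=
    List.countP_congr (fun x hx => by
      rw [hR x (List.mem_range.mp hx)])
  have hcntC : List.countP
      (fun (x : Nat) => decide (((List.range N).map (fun (y : Nat) => pvElem (pvRedim X (N : Int)) (y : Int) (x : Int))).sum = pvSumaMagica (N : Int)))
      (List.range N)
      = List.countP (fun j => decide (pvColSum X N j = pvSumaMagica (N : Int))) (List.range N) :=
    List.countP_congr (fun x hx => by
      rw [hC x (List.mem_range.mp hx)])
  have hD : ((List.range N).map (fun (y : Nat) => pvElem (pvRedim X (N : Int)) (y : Int) (y : Int))).sum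
      = ((List.range N).map (fun i => pvS X N i i)).sum :=
    congrArg List.sum (List.map_congr_left (fun y hy =>
      hElem y y (List.mem_range.mp hy) (List.mem_range.mp hy)))
  have hA : ((List.range N).map (fun (y : Nat) => pvElem (pvRedim X (N : Int)) (y : Int) ((N : Int) - 1 - (y : Int)))).sum
      = ((List.range N).map (fun i => pvS X N i (N - 1 - i))).sum :=
    congrArg List.sum (List.map_congr_left (fun y hy => hElemAnti y (List.mem_range.mp hy)))
  rw [hcntR, hcntC, hD, hA]

lemma pvMapGetD (N : Nat) (c : List Int) (hc : c.length = N) :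
    (List.range N).map (fun j => c.getD j 0) = c := by
  apply List.ext_getElem (by simp [hc])
  intro k h1 h2
  simp only [List.getElem_map, List.getElem_range]
  rw [List.getD_eq_getElem _ _ (by simpa [hc] using h2)]

lemma pvInner_aux (X : List Int) (N : Nat) (i : Nat) (hi : i < N)
    (r c : List Int) (hr : r.length = N) (hc : c.length = N) (d a : Int)
    (t : Nat) (ht : t ≤ N) :
    (PySem.List.pyRange 0 (t : Int) 1).foldl (pvAltBody X (N : Int) (i : Int)) (r, c, d, a) =
      (r.set i (r.getD i 0 + ((List.range t).map (fun j => pvS X N i j)).sum),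
       (List.range N).map (fun j => c.getD j 0 + if j < t then pvS X N i j else 0),
       d + (if i < t then pvS X N i i else 0),
       a + (if N - 1 - i < t then pvS X N i (N - 1 - i) else 0)) := by
  induction t with
  | zero =>
    rw [PySem.List.pyRange_one_eq_nil (by omega)]
    simp only [List.foldl_nil, List.range_zero, List.map_nil, List.sum_nil, add_zero,
      Nat.not_lt_zero, if_false]
    refine Prod.ext ?_ (Prod.ext ?_ rfl)
    · rw [List.getD_eq_getElem _ _ (by omega), List.set_getElem_self]
    · exact (pvMapGetD N c hc).symm
  | succ t ih =>
    have htN : t < N := by omega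
    have hv : PySem.List.pyGetD X ((i : Int) * (N : Int) + (t : Int)) 0 = pvS X N i t := by
      rw [show ((i : Int) * (N : Int) + (t : Int)) = ((i * N + t : Nat) : Int) by push_cast; ring,
        PySem.List.pyGetD_natCast]
      rfl
    rw [show (((t + 1 : Nat) : Int)) = (t : Int) + 1 by push_cast; ring,
      PySem.List.pyRange_one_succ_right (by omega), List.foldl_append, ih (by omega)]
    simp only [List.foldl_cons, List.foldl_nil]
    unfold pvAltBody
    dsimp only
    simp only [PySem.List.pySetD_natCast, PySem.List.pyGetD_natCast, hv, Prod.mk.injEq]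
    refine ⟨?_, ?_, ?_, ?_⟩
    · rw [List.set_set]
      congr 1
      rw [List.getD_eq_getElem _ _ (by simp; omega), List.getElem_set_self,
        List.range_succ, List.map_append, List.sum_append]
      simp [add_assoc]
    · rw [PySem.List.getD_map_range _ _ _ _ htN]
      apply List.ext_getElem (by simp)
      intro k h1 h2
      simp only [List.getElem_set, List.getElem_map, List.getElem_range]
      by_cases hk : t = k
      · subst hk
        rw [if_pos rfl, if_neg (by omega), if_pos (by omega)]
        ring
      · rw [if_neg hk]
        by_cases hk2 : k < t
        · rw [if_pos hk2, if_pos (by omega)]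
        · rw [if_neg hk2, if_neg (by omega)]
    · by_cases hit : i = t
      · subst hit
        rw [if_pos rfl, if_neg (by omega), if_pos (by omega), add_zero]
      · rw [if_neg (by exact_mod_cast fun h => hit (by exact_mod_cast h))]
        by_cases hlt : i < t
        · rw [if_pos hlt, if_pos (by omega)]
        · rw [if_neg hlt, if_neg (by omega)]
    · by_cases hat : N - 1 - i = t
      · rw [if_pos (by omega), if_neg (by omega), if_pos (by omega), add_zero, hat]
      · rw [if_neg (by omega)]
        by_cases hlt : N - 1 - i < t
        · rw [if_pos hlt, if_pos (by omega)]
        · rw [if_neg hlt, if_neg (by omega)]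

lemma pvOuter_aux (X : List Int) (N : Nat) (t : Nat) (ht : t ≤ N) :
    (PySem.List.pyRange 0 (t : Int) 1).foldl
        (fun st i => (PySem.List.pyRange 0 (N : Int) 1).foldl (pvAltBody X (N : Int) i) st)
        (List.replicate N 0, List.replicate N 0, 0, 0) =
      ((List.range N).map (fun i => if i < t then pvRowSum X N i else 0),
       (List.range N).map (fun j => ((List.range t).map (fun i => pvS X N i j)).sum),
       ((List.range t).map (fun i => pvS X N i i)).sum,
       ((List.range t).map (fun i => pvS X N i (N - 1 - i))).sum) := by
  induction t with
  | zero =>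
    rw [Nat.cast_zero, PySem.List.pyRange_one_eq_nil le_rfl]
    simp
  | succ t ih =>
    have htN : t < N := by omega
    rw [show (((t + 1 : Nat) : Int)) = (t : Int) + 1 by push_cast; ring,
      PySem.List.pyRange_one_succ_right (by omega), List.foldl_append, ih (by omega)]
    simp only [List.foldl_cons, List.foldl_nil]
    rw [pvInner_aux X N t htN _ _ (by simp) (by simp) _ _ N le_rfl]
    refine Prod.ext ?_ (Prod.ext ?_ (Prod.ext ?_ ?_)) <;> dsimp only
    · rw [List.getD_eq_getElem _ _ (by simp; omega)]
      simp only [List.getElem_map, List.getElem_range, if_neg (lt_irrefl t), zero_add]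
      apply List.ext_getElem (by simp)
      intro k h1 h2
      simp only [List.getElem_set, List.getElem_map, List.getElem_range]
      by_cases hk : t = k
      · subst hk; rw [if_pos rfl, if_pos (by omega)]; rfl
      · rw [if_neg hk]
        by_cases hk2 : k < t
        · rw [if_pos hk2, if_pos (by omega)]
        · rw [if_neg hk2, if_neg (by omega)]
    · apply List.map_congr_left
      intro j hj
      rw [PySem.List.getD_map_range _ _ _ _ (List.mem_range.mp hj),
        List.range_succ, List.map_append, List.sum_append]
      simp [List.mem_range.mp hj]
    · rw [List.range_succ, List.map_append, List.sum_append]; simp [htN]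
    · rw [List.range_succ, List.map_append, List.sum_append]
      simp [show N - 1 - t < N by omega]

lemma pvB_eq (X : List Int) (N : Nat) :
    calculaAptitudMax_alt X (N : Int) = pvMagicCnt X N := by
  unfold calculaAptitudMax_alt pvMagicCnt pvSumaMagica
  simp only [Int.toNat_natCast]
  rw [pvOuter_aux X N N le_rfl]
  dsimp only
  simp only [PySem.List.foldl_ite_add_one, List.countP_map, zero_add]
  generalize PySem.Int.floordiv ((N : Int) * ((N : Int) ^ 2 + 1)) 2 = M
  have h1 : List.countP ((fun x => decide (x = M)) ∘ fun i => if i < N then pvRowSum X N i else 0)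
      (List.range N) = List.countP (fun i => decide (pvRowSum X N i = M)) (List.range N) :=
    List.countP_congr (fun x hx => by
      simp [Function.comp, if_pos (List.mem_range.mp hx)])
  have h2 : List.countP ((fun x => decide (x = M)) ∘ fun j => (List.map (fun i => pvS X N i j) (List.range N)).sum)
      (List.range N) = List.countP (fun j => decide (pvColSum X N j = M)) (List.range N) :=
    List.countP_congr (fun x hx => by simp [Function.comp, pvColSum])
  rw [h1, h2]

-- ===== VERDICT (by name: the statement is the Claim_ definition above) =====
theorem calculaAptitudMax_spec : Claim_equal_calculaAptitudMax := by
  intro X n _hDom hPre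
  unfold Spec_calculaAptitudMax
  by_cases hn : 0 < n
  · have hN : 0 < n.toNat := by omega
    have hnN : n = ((n.toNat : Nat) : Int) := by omega
    have hlen : X.length = n.toNat * n.toNat := by
      have h1 := hPre.1 hn
      rw [hnN] at h1
      exact_mod_cast h1
    rw [hnN, pvA_eq X n.toNat hN hlen, pvB_eq X n.toNat]
  · -- n ≤ 0: every loop is empty on both sides
    have hr : PySem.List.pyRange 0 n 1 = [] := PySem.List.pyRange_one_eq_nil (by omega)
    have ht : n.toNat = 0 := by omega
    unfold calculaAptitudMax calculaAptitudMax_alt pvSumaMagica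
    simp [hr, ht]
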